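-- pv_equiv track=rewrite | github.com/fjkz/junkcode | nabeatsu/nabeatsu.py | is_nabeatsu_number
-- ===== SOURCE A (Python) =====
-- def is_nabeatsu_number(num: int) -> bool:
--     if num % 3 == 0:
--         return True
--     while num > 0:
--         if num % 10 == 3:
--             return True
--         num //= 10
--     return False
-- ===== SOURCE B (Python) =====
-- def is_nabeatsu_number(num: int) -> bool:
--     # Keep the divisibility fast path; replace the digit-extraction loop
--     # with a string membership test (guarded so non-positive numbers never
--     # take the string path, exactly like A's loop).
--     return num % 3 == 0 or (num > 0 and '3' in str(num))
-- ===== Notes on version B (the rewrite author's own statement) =====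
-- stated objective: idiomatic
-- what changed: The hand-written while-loop that extracts decimal digits arithmetically is replaced by the idiomatic string membership test of the digit character in str(num), with a positivity guard matching the loop's entry condition.
import Mathlib
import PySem

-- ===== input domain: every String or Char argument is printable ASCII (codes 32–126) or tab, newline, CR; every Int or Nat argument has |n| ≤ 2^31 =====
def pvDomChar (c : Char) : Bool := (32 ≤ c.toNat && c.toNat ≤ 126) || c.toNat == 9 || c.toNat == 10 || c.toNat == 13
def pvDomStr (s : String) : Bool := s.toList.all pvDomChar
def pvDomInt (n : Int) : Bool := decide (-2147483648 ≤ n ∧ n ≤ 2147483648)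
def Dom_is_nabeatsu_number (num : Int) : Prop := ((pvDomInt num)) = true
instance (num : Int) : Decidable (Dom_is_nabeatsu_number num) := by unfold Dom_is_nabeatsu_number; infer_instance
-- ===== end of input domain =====

-- B replaces A's hand-written digit-extraction loop by the idiomatic string
-- membership test `'3' in str(num)` (guarded by num > 0, like A's loop entry).
-- Return-value equivalence is proved on all of Dom.

-- ===== PORT A =====
-- the `while num > 0:` loop of A, step for step
def pvLoopA (num : Int) : Bool :=
  if 0 < num then
    if PySem.Int.mod num 10 == 3 then true
    else pvLoopA (PySem.Int.floordiv num 10)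
  else false
termination_by num.toNat
decreasing_by
  have h10 : PySem.Int.floordiv num 10 = num / 10 :=
    PySem.Int.floordiv_eq_ediv_of_pos (by norm_num)
  rw [h10]; omega

def is_nabeatsu_number (num : Int) : Bool :=
  if PySem.Int.mod num 3 == 0 then true
  else pvLoopA num

-- ===== PORT B =====
def is_nabeatsu_number_alt (num : Int) : Bool :=
  PySem.Int.mod num 3 == 0 || (decide (0 < num) && PySem.Str.isIn "3" (PySem.Int.toStr num))

-- ===== PRECONDITION & SPEC =====
def Spec_is_nabeatsu_number (num : Int) (out : Bool) : Prop := out = is_nabeatsu_number_alt num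
instance (num : Int) (out : Bool) : Decidable (Spec_is_nabeatsu_number num out) := by unfold Spec_is_nabeatsu_number; infer_instance

-- ===== CLAIM (what is proved, stated in full; the proofs are below) =====
def Claim_equal_is_nabeatsu_number : Prop := ∀ (num : Int), Dom_is_nabeatsu_number num → Spec_is_nabeatsu_number num (is_nabeatsu_number num)

-- ===== LEMMAS AND PROOFS =====

-- A's loop, restated on Nat (mirrors pvLoopA via floordiv/mod on positives)
def pvNatLoop (n : Nat) : Bool :=
  if h : n = 0 then false
  else if n % 10 = 3 then true
  else pvNatLoop (n / 10)
termination_by n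
decreasing_by omega

lemma pvLoopA_eq_natLoop (num : Int) (hnn : 0 ≤ num) : pvLoopA num = pvNatLoop num.toNat := by
  induction hn : num.toNat using Nat.strong_induction_on generalizing num with
  | _ n ih =>
    subst hn
    rw [pvLoopA, pvNatLoop]
    by_cases hpos : 0 < num
    · have hnum : num = (num.toNat : Int) := by omega
      have hne : ¬ num.toNat = 0 := by omega
      simp only [hpos, if_pos, hne]
      have hmod : PySem.Int.mod num 10 = ((num.toNat % 10 : Nat) : Int) := by
        rw [hnum]; exact_mod_cast PySem.Int.mod_natCast num.toNat 10
      have hdiv : PySem.Int.floordiv num 10 = ((num.toNat / 10 : Nat) : Int) := by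
        rw [hnum]; exact_mod_cast PySem.Int.floordiv_natCast num.toNat 10
      by_cases h3 : num.toNat % 10 = 3
      · have h3' : num % 10 = 3 := by
          rw [← PySem.Int.mod_eq_emod_of_pos (by norm_num : (0:Int) < 10), hmod, h3]; rfl
        simp [h3, h3']
      · have hm : ¬ (PySem.Int.mod num 10 == 3) = true := by
          simp; omega
        have hq : (PySem.Int.floordiv num 10).toNat = num.toNat / 10 := by
          rw [hdiv]; omega
        rw [ih (num.toNat / 10) (by omega) _ (by rw [hdiv]; positivity) hq]
        have h3' : num % 10 ≠ 3 := by
          rw [← PySem.Int.mod_eq_emod_of_pos (by norm_num : (0:Int) < 10), hmod]; omega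
        simp [h3, h3']
    · have h0 : num = 0 := by omega
      simp [h0]

-- digit-3 test shaped exactly like Nat.toDigitsCore's recursion
def pvDig3 (n : Nat) : Bool :=
  (n % 10 == 3) || (if h : n / 10 = 0 then false else pvDig3 (n / 10))
termination_by n
decreasing_by omega

lemma digitChar_eq_three_iff (d : Nat) (hd : d < 10) : (d.digitChar = '3') ↔ d = 3 := by
  interval_cases d <;> simp [Nat.digitChar]

lemma toDigitsCore_succ (f n : Nat) (acc : List Char) :
    Nat.toDigitsCore 10 (f + 1) n acc =
      if n / 10 = 0 then (n % 10).digitChar :: acc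
      else Nat.toDigitsCore 10 f (n / 10) ((n % 10).digitChar :: acc) := rfl

lemma mem_toDigitsCore (f n : Nat) (acc : List Char) (hf : n < f) :
    ('3' ∈ Nat.toDigitsCore 10 f n acc) ↔ (pvDig3 n = true ∨ '3' ∈ acc) := by
  induction f generalizing n acc with
  | zero => omega
  | succ f ih =>
    rw [toDigitsCore_succ, pvDig3]
    by_cases h0 : n / 10 = 0
    · rw [if_pos h0, dif_pos h0]
      simp only [List.mem_cons]
      have hd : n % 10 < 10 := Nat.mod_lt _ (by omega)
      constructor
      · rintro (h | h)
        · left; simp [(digitChar_eq_three_iff _ hd).mp h.symm]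
        · right; exact h
      · rintro (h | h)
        · left; simp only [Bool.or_eq_true, beq_iff_eq] at h
          rcases h with h | h
          · exact ((digitChar_eq_three_iff _ hd).mpr h).symm
          · simp at h
        · right; exact h
    · rw [if_neg h0, dif_neg h0]
      have hlt : n / 10 < f := by omega
      rw [ih (n / 10) _ hlt, List.mem_cons]
      have hd : n % 10 < 10 := Nat.mod_lt _ (by omega)
      constructor
      · rintro (h | h | h)
        · left; simp [h]
        · left; simp [(digitChar_eq_three_iff _ hd).mp h.symm]
        · right; exact h
      · rintro (h | h)
        · simp only [Bool.or_eq_true, beq_iff_eq] at h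
          rcases h with h | h
          · right; left; exact ((digitChar_eq_three_iff _ hd).mpr h).symm
          · left; exact h
        · right; right; exact h

lemma natLoop_eq_dig3 (n : Nat) (h : n ≠ 0) : pvNatLoop n = pvDig3 n := by
  induction n using Nat.strong_induction_on with
  | _ n ih =>
    rw [pvNatLoop, pvDig3, dif_neg h]
    by_cases h3 : n % 10 = 3
    · simp [h3]
    · have hm : (n % 10 == 3) = false := by simp [h3]
      rw [if_neg h3, hm, Bool.false_or]
      by_cases h0 : n / 10 = 0
      · rw [dif_pos h0, h0, pvNatLoop]; simp
      · rw [dif_neg h0, ih (n / 10) (by omega) h0]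

lemma loopA_eq_string_test (num : Int) :
    pvLoopA num = (decide (0 < num) && PySem.Str.isIn "3" (PySem.Int.toStr num)) := by
  by_cases hpos : 0 < num
  · rw [pvLoopA_eq_natLoop num (le_of_lt hpos)]
    simp only [hpos, decide_true, Bool.true_and]
    have hC : PySem.Str.isIn "3" (PySem.Int.toStr num)
        = PySem.Chars.isIn ['3'] (Nat.toDigits 10 num.toNat) := by
      rw [PySem.Str.isIn_eq, PySem.Int.toList_toStr, PySem.Int.toChars, if_neg (by omega)]
      rfl
    rw [hC, natLoop_eq_dig3 num.toNat (by omega)]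
    rcases Bool.eq_false_or_eq_true (PySem.Chars.isIn ['3'] (Nat.toDigits 10 num.toNat)) with hb | hb
    · rw [hb]
      rw [PySem.Chars.isIn_iff_infix] at hb
      have hmem : '3' ∈ Nat.toDigits 10 num.toNat := (List.singleton_infix_iff '3' _).mp hb
      rw [Nat.toDigits, mem_toDigitsCore (num.toNat + 1) num.toNat [] (by omega)] at hmem
      rcases hmem with h | h
      · exact h
      · simp at h
    · rw [hb]
      rw [PySem.Chars.isIn_eq_false_iff] at hb
      have hmem : '3' ∉ Nat.toDigits 10 num.toNat := fun hm =>
        hb ((List.singleton_infix_iff '3' _).mpr hm)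
      rw [Nat.toDigits, mem_toDigitsCore (num.toNat + 1) num.toNat [] (by omega)] at hmem
      push Not at hmem
      simpa using hmem.1
  · rw [pvLoopA]
    simp [hpos]

-- ===== VERDICT (by name: the statement is the Claim_ definition above) =====
theorem is_nabeatsu_number_spec : Claim_equal_is_nabeatsu_number := by
  intro num _
  unfold Spec_is_nabeatsu_number is_nabeatsu_number is_nabeatsu_number_alt
  rw [loopA_eq_string_test]
  cases hc : (PySem.Int.mod num 3 == 0) <;> rfl
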